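-- pv_equiv track=rewrite | github.com/yuefan98/2nd-NLEIS-manuscripts | impedance/models/nleis/.ipynb_checkpoints/fitting-checkpoint.py | extract_circuit_elements
-- ===== SOURCE A (Python) =====
-- ints = '0123456789'
--
-- def extract_circuit_elements(circuit):
--     """ Extracts circuit elements from a circuit string.
--
--     Parameters
--     ----------
--     circuit : str
--         Circuit string.
--
--     Returns
--     -------
--     extracted_elements : list
--         list of extracted elements.
--
--     """
--     p_string = [x for x in circuit if x not in 'p(),-,t()']
--     extracted_elements = []
--     current_element = []
--     length = len(p_string)
--     for i, char in enumerate(p_string):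
--         if char not in ints:
--             current_element.append(char)
--         else:
--             # min to prevent looking ahead past end of list
--             if p_string[min(i+1, length-1)] not in ints:
--                 current_element.append(char)
--                 extracted_elements.append(''.join(current_element))
--                 current_element = []
--             else:
--                 current_element.append(char)
--     extracted_elements.append(''.join(current_element))
--     return extracted_elements
-- ===== SOURCE B (Python) =====
-- def extract_circuit_elements(circuit):
--     """Extracts circuit elements from a circuit string (single back-to-front pass)."""
--     digits = '0123456789'
--     s = [c for c in circuit if c not in 'p(),-,t()']
--     rev_tokens = []   # completed tokens, rightmost first
--     cur = []          # characters of the current token, in reverse order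
--     nxt = None        # the character to the right of c (None at the right end)
--     for c in reversed(s):
--         if c in digits and nxt is not None and nxt not in digits:
--             # token boundary falls between c and nxt: close the token to the right
--             rev_tokens.append(''.join(reversed(cur)))
--             cur = [c]
--         else:
--             cur.append(c)
--         nxt = c
--     rev_tokens.append(''.join(reversed(cur)))
--     rev_tokens.reverse()
--     return rev_tokens
-- ===== Notes on version B (the rewrite author's own statement) =====
-- stated objective: alternative
-- what changed: Replaces A's left-to-right enumerate loop with index arithmetic (min lookahead), a current_element accumulator and a trailing final append by a single back-to-front pass that carries the successor character and either starts a new token or extends the first one, joining at the end.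
import Mathlib
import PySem

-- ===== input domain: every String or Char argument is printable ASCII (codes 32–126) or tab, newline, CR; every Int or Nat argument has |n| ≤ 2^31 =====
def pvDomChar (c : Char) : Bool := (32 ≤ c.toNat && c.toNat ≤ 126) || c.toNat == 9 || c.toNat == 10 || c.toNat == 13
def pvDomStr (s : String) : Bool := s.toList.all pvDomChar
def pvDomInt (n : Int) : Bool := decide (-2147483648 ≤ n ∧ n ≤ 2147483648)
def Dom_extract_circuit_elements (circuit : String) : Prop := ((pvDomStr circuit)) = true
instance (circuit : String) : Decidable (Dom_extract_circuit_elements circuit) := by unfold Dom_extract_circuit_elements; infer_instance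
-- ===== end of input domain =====

-- B replaces A's index-and-lookahead accumulator loop by a single back-to-front pass that
-- carries the successor character; objective: alternative decomposition (same O(n) cost).

-- the module constant ints = '0123456789' (used, as in Python, by both versions)
def pvInts : List Char := "0123456789".toList
-- the filter string 'p(),-,t()' (shared literal)
def pvFilt : List Char := "p(),-,t()".toList

-- ===== PORT A =====
-- A's for-loop over enumerate(p_string): state (extracted_elements, current_element).
-- The lookahead p_string[min(i+1, length-1)] is the NEXT character when one exists
-- (rest nonempty, i+1 ≤ length-1) and the current character itself at the last index
-- (i = length-1); the recursion below realises exactly that index expression.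
def pvLoopA (acc : List String) (cur : List Char) : List Char → List String
  | [] => acc ++ [String.ofList cur]                       -- final extracted_elements.append(''.join(current_element))
  | c :: rest =>
      if !(pvInts.contains c) then
        pvLoopA acc (cur ++ [c]) rest
      else
        -- look = p_string[min(i+1, length-1)]
        let look : Char := match rest with | [] => c | d :: _ => d
        if !(pvInts.contains look) then
          pvLoopA (acc ++ [String.ofList (cur ++ [c])]) [] rest
        else
          pvLoopA acc (cur ++ [c]) rest

def extract_circuit_elements (circuit : String) : List String :=
  let p_string := circuit.toList.filter (fun x => !(pvFilt.contains x))
  pvLoopA [] [] p_string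

-- ===== PORT B =====
-- one step of B's `for c in reversed(s)` loop; state = (rev_tokens, cur, nxt)
def pvStepB (c : Char) (st : List String × List Char × Option Char) :
    List String × List Char × Option Char :=
  let rev_tokens := st.1
  let cur := st.2.1
  let nxt := st.2.2
  if pvInts.contains c && (match nxt with | some d => !(pvInts.contains d) | none => false) then
    -- rev_tokens.append(''.join(reversed(cur))); cur = [c]
    (rev_tokens ++ [String.ofList cur.reverse], [c], some c)
  else
    -- cur.append(c)
    (rev_tokens, cur ++ [c], some c)

def extract_circuit_elements_alt (circuit : String) : List String :=
  let s := circuit.toList.filter (fun x => !(pvFilt.contains x))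
  -- `for c in reversed(s)` with accumulated state = foldr over s
  let st := s.foldr pvStepB ([], [], none)
  -- rev_tokens.append(''.join(reversed(cur))); rev_tokens.reverse()
  ((st.1 ++ [String.ofList st.2.1.reverse]).reverse)

-- ===== PRECONDITION & SPEC =====
def Spec_extract_circuit_elements (circuit : String) (out : List String) : Prop := out = extract_circuit_elements_alt circuit
instance (circuit : String) (out : List String) : Decidable (Spec_extract_circuit_elements circuit out) := by unfold Spec_extract_circuit_elements; infer_instance

-- ===== CLAIM (what is proved, stated in full; the proofs are below) =====
def Claim_equal_extract_circuit_elements : Prop := ∀ (circuit : String), Dom_extract_circuit_elements circuit → Spec_extract_circuit_elements circuit (extract_circuit_elements circuit)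

-- ===== LEMMAS AND PROOFS =====

-- reference splitter, used only in the proofs
def pvR : List Char → List (List Char)
  | [] => [[]]
  | [c] => [[c]]
  | c :: d :: rest =>
      if pvInts.contains c && !(pvInts.contains d) then
        [c] :: pvR (d :: rest)
      else
        match pvR (d :: rest) with
        | t :: ts => (c :: t) :: ts
        | [] => [[c]]

theorem pvR_ne_nil (l : List Char) : pvR l ≠ [] := by
  match l with
  | [] => simp [pvR]
  | [c] => simp [pvR]
  | c :: d :: rest =>
      rw [pvR]
      split
      · simp
      · split <;> simp

-- B's foldr state in terms of pvR: completed tokens are the tail of pvR (reversed),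
-- cur is the first token of pvR in reverse, nxt is the head of the remaining input
theorem pvB_foldr_eq (l : List Char) :
    l.foldr pvStepB ([], [], none) =
      (((pvR l).tail.map String.ofList).reverse, (pvR l).headI.reverse, l.head?) := by
  induction l with
  | nil => simp [pvR]
  | cons c rest ih =>
      rw [List.foldr_cons, ih]
      match rest with
      | [] => by_cases hc : c ∈ pvInts <;> simp [pvStepB, pvR, hc]
      | d :: rest' =>
          obtain ⟨t, ts, ht⟩ : ∃ t ts, pvR (d :: rest') = t :: ts := by
            rcases h : pvR (d :: rest') with _ | ⟨t, ts⟩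
            · exact absurd h (pvR_ne_nil _)
            · exact ⟨t, ts, rfl⟩
          by_cases hc : c ∈ pvInts <;> by_cases hd : d ∈ pvInts <;>
            simp [pvStepB, pvR, hc, hd, ht]

-- A's loop equals acc ++ (cur prepended to the first token of pvR l), joined
theorem pvA_loop_eq (l : List Char) : ∀ (acc : List String) (cur : List Char),
    pvLoopA acc cur l =
      acc ++ (match pvR l with
              | t :: ts => (String.ofList (cur ++ t)) :: ts.map String.ofList
              | [] => [String.ofList cur]) := by
  induction l with
  | nil => intro acc cur; simp [pvLoopA, pvR]
  | cons c rest ih =>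
      intro acc cur
      match rest with
      | [] => by_cases hc : c ∈ pvInts <;> simp [pvLoopA, pvR, hc]
      | d :: rest' =>
          obtain ⟨t, ts, ht⟩ : ∃ t ts, pvR (d :: rest') = t :: ts := by
            rcases h : pvR (d :: rest') with _ | ⟨t, ts⟩
            · exact absurd h (pvR_ne_nil _)
            · exact ⟨t, ts, rfl⟩
          by_cases hc : c ∈ pvInts <;> by_cases hd : d ∈ pvInts <;>
            rw [pvLoopA] <;> simp [hc, hd, ih, pvR, ht, List.append_assoc]

-- ===== VERDICT (by name: the statement is the Claim_ definition above) =====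
theorem extract_circuit_elements_spec : Claim_equal_extract_circuit_elements := by
  intro circuit _
  unfold Spec_extract_circuit_elements
  show pvLoopA [] [] (circuit.toList.filter (fun x => !(pvFilt.contains x))) =
    (let st := (circuit.toList.filter (fun x => !(pvFilt.contains x))).foldr pvStepB ([], [], none)
     (st.1 ++ [String.ofList st.2.1.reverse]).reverse)
  rw [pvB_foldr_eq, pvA_loop_eq]
  rcases h : pvR (circuit.toList.filter (fun x => !(pvFilt.contains x))) with _ | ⟨t, ts⟩
  · exact absurd h (pvR_ne_nil _)
  · simp
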